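-- pv_equiv track=rewrite | github.com/Spyboss/P.U.L.S.E. | utils/intent_handler.py | _parse_system_command
-- ===== SOURCE A (Python) =====
-- def _parse_system_command(text):
--     """
--     Parse system commands
--     """
--     if "help" in text.lower():
--         return {"command_type": "help"}
--     elif any(word in text.lower() for word in ["exit", "quit", "stop"]):
--         return {"command_type": "exit"}
--     elif "restart" in text.lower():
--         return {"command_type": "restart"}
--     elif "status" in text.lower() or "system" in text.lower():
--         return {"command_type": "status"}
--     elif "cli" in text.lower() or "ui" in text.lower() or "dashboard" in text.lower():
--         return {"command_type": "cli_ui"}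
--     elif "vitals" in text.lower() or "health" in text.lower() or "check" in text.lower():
--         return {"command_type": "status"}
--
--     return {"command_type": "system"}
-- ===== SOURCE B (Python) =====
-- # Flat keyword->(priority, command_type) map; scan ALL keywords once, pick the
-- # minimum-priority match instead of an early-return cascade.
-- _KEYWORD_MAP = {
--     "help": (0, "help"),
--     "exit": (1, "exit"), "quit": (1, "exit"), "stop": (1, "exit"),
--     "restart": (2, "restart"),
--     "status": (3, "status"), "system": (3, "status"),
--     "cli": (4, "cli_ui"), "ui": (4, "cli_ui"), "dashboard": (4, "cli_ui"),
--     "vitals": (5, "status"), "health": (5, "status"), "check": (5, "status"),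
-- }
--
-- def _parse_system_command(text):
--     low = text.lower()
--     best = min((prio_ct for kw, prio_ct in _KEYWORD_MAP.items() if kw in low),
--                default=(6, "system"))
--     return {"command_type": best[1]}
-- ===== Notes on version B (the rewrite author's own statement) =====
-- stated objective: alternative
-- what changed: Replaces the early-return elif cascade with a flat keyword-to-(priority,type) map: B scans all keywords once over a single lowered copy and takes the minimum-priority match, falling back to the default command type when nothing matches, instead of testing branch conditions in order and returning at the first hit.
import Mathlib
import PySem

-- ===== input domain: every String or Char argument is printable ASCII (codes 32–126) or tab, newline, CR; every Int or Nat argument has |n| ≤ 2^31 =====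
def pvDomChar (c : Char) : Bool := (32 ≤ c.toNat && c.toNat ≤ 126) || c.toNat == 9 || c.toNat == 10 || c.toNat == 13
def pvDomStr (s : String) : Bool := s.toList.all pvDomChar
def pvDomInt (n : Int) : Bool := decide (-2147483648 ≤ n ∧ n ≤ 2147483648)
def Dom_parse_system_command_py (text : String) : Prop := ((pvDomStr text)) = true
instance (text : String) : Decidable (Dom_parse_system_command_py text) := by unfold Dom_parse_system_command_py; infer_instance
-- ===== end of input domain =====

-- B replaces A's early-return elif cascade by a flat keyword->(priority,type) table scanned in full, returning the minimum-priority match (alternative decomposition, same cost); return value proved equal on all of Dom.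


-- ===== PORT A =====
def parse_system_command_py (text : String) : List (String × String) :=
  if PySem.Str.isIn "help" (PySem.Str.lower text) then [("command_type", "help")]
  else if (["exit", "quit", "stop"].any (fun word => PySem.Str.isIn word (PySem.Str.lower text))) then
    [("command_type", "exit")]
  else if PySem.Str.isIn "restart" (PySem.Str.lower text) then [("command_type", "restart")]
  else if PySem.Str.isIn "status" (PySem.Str.lower text) || PySem.Str.isIn "system" (PySem.Str.lower text) then
    [("command_type", "status")]
  else if PySem.Str.isIn "cli" (PySem.Str.lower text) || PySem.Str.isIn "ui" (PySem.Str.lower text)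
      || PySem.Str.isIn "dashboard" (PySem.Str.lower text) then
    [("command_type", "cli_ui")]
  else if PySem.Str.isIn "vitals" (PySem.Str.lower text) || PySem.Str.isIn "health" (PySem.Str.lower text)
      || PySem.Str.isIn "check" (PySem.Str.lower text) then
    [("command_type", "status")]
  else [("command_type", "system")]

-- ===== PORT B =====
-- the flat keyword -> (priority, command_type) map from Source B (insertion order)
def pvKeywordMap : List (String × Int × String) :=
  [("help", 0, "help"),
   ("exit", 1, "exit"), ("quit", 1, "exit"), ("stop", 1, "exit"),
   ("restart", 2, "restart"),
   ("status", 3, "status"), ("system", 3, "status"),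
   ("cli", 4, "cli_ui"), ("ui", 4, "cli_ui"), ("dashboard", 4, "cli_ui"),
   ("vitals", 5, "status"), ("health", 5, "status"), ("check", 5, "status")]

-- min over the matching (priority, type) pairs with default (6, "system");
-- within one priority all command_types coincide, so strict priority compare = Python's tuple min
def parse_system_command_py_alt (text : String) : List (String × String) :=
  let low := PySem.Str.lower text
  let best := pvKeywordMap.foldl
    (fun acc kv => if PySem.Str.isIn kv.1 low && decide (kv.2.1 < acc.1) then kv.2 else acc)
    ((6 : Int), "system")
  [("command_type", best.2)]

-- ===== PRECONDITION & SPEC =====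
def Spec_parse_system_command_py (text : String) (out : List (String × String)) : Prop := out = parse_system_command_py_alt text
instance (text : String) (out : List (String × String)) : Decidable (Spec_parse_system_command_py text out) := by unfold Spec_parse_system_command_py; infer_instance

-- ===== CLAIM (what is proved, stated in full; the proofs are below) =====
def Claim_equal_parse_system_command_py : Prop := ∀ (text : String), Dom_parse_system_command_py text → Spec_parse_system_command_py text (parse_system_command_py text)

-- ===== LEMMAS AND PROOFS =====
-- Both ports are determined by which of the 13 keywords occur in the lowered text:
-- abstract each occurrence test as a Bool variable and check all 2^13 cases by decide;
-- the instantiated lemma is definitionally equal to the goal once the literal fold unfolds.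
set_option maxHeartbeats 4000000 in
theorem pv_abstract_eq (h e q st r s0 sy c u d v he ch : Bool) :
    (if h then [("command_type", "help")]
     else if (e || (q || (st || false))) then [("command_type", "exit")]
     else if r then [("command_type", "restart")]
     else if s0 || sy then [("command_type", "status")]
     else if c || u || d then [("command_type", "cli_ui")]
     else if v || he || ch then [("command_type", "status")]
     else [("command_type", "system")] : List (String × String)) =
    [("command_type",
      (List.foldl
        (fun (acc : Int × String) (kv : Bool × Int × String) =>
          if kv.1 && decide (kv.2.1 < acc.1) then kv.2 else acc)
        ((6 : Int), "system")
        [(h, 0, "help"),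
         (e, 1, "exit"), (q, 1, "exit"), (st, 1, "exit"),
         (r, 2, "restart"),
         (s0, 3, "status"), (sy, 3, "status"),
         (c, 4, "cli_ui"), (u, 4, "cli_ui"), (d, 4, "cli_ui"),
         (v, 5, "status"), (he, 5, "status"), (ch, 5, "status")]).2)] := by
  revert h e q st r s0 sy c u d v he ch
  decide

-- ===== VERDICT (by name: the statement is the Claim_ definition above) =====
set_option maxHeartbeats 4000000 in
theorem parse_system_command_py_spec : Claim_equal_parse_system_command_py := by
  intro text _
  unfold Spec_parse_system_command_py parse_system_command_py parse_system_command_py_alt pvKeywordMap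
  simp only [List.any_cons, List.any_nil]
  exact pv_abstract_eq
    (PySem.Str.isIn "help" (PySem.Str.lower text))
    (PySem.Str.isIn "exit" (PySem.Str.lower text))
    (PySem.Str.isIn "quit" (PySem.Str.lower text))
    (PySem.Str.isIn "stop" (PySem.Str.lower text))
    (PySem.Str.isIn "restart" (PySem.Str.lower text))
    (PySem.Str.isIn "status" (PySem.Str.lower text))
    (PySem.Str.isIn "system" (PySem.Str.lower text))
    (PySem.Str.isIn "cli" (PySem.Str.lower text))
    (PySem.Str.isIn "ui" (PySem.Str.lower text))
    (PySem.Str.isIn "dashboard" (PySem.Str.lower text))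
    (PySem.Str.isIn "vitals" (PySem.Str.lower text))
    (PySem.Str.isIn "health" (PySem.Str.lower text))
    (PySem.Str.isIn "check" (PySem.Str.lower text))
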